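-- pv_equiv track=rewrite | github.com/zhang-zhiyong/FlagCX | plugin/torch/sdccl/__init__.py | replace_prefix
-- ===== SOURCE A (Python) =====
-- def replace_prefix(arg):
--     device_list = ["cuda", "mlu", "npu", "musa", "txda", "gcu"]
--     sdccl_prefix = "sdccl_dev"
--     if isinstance(arg, str):
--         for string in device_list:
--             if string in arg:
--                 arg = arg.replace(string, sdccl_prefix)
--     return arg
-- ===== SOURCE B (Python) =====
-- def replace_prefix(arg):
--     if not isinstance(arg, str):
--         return arg
--     devices = ("cuda", "mlu", "npu", "musa", "txda", "gcu")
--     pieces = []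
--     i = 0
--     n = len(arg)
--     while i < n:
--         for d in devices:
--             if arg.startswith(d, i):
--                 pieces.append("sdccl_dev")
--                 i += len(d)
--                 break
--         else:
--             pieces.append(arg[i])
--             i += 1
--     return "".join(pieces)
-- ===== Notes on version B (the rewrite author's own statement) =====
-- stated objective: alternative
-- what changed: B replaces the six sequential whole-string str.replace passes by a single left-to-right scan that, at each position, substitutes the first device name matching there.
-- intended difference: On strings containing 'gcuda' (the only overlap between two device names) A's 'cuda' pass runs first and replaces the inner 'cuda' ('gcuda' -> 'gsdccl_dev'), while B's left-to-right scan matches 'gcu' first ('gcuda' -> 'sdccl_devda'); leftmost-match is the standard single-pass behaviour on this unspecified overlap corner. — e.g. on replace_prefix("gcuda"): A returns "gsdccl_dev", B returns "sdccl_devda"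
import Mathlib
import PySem

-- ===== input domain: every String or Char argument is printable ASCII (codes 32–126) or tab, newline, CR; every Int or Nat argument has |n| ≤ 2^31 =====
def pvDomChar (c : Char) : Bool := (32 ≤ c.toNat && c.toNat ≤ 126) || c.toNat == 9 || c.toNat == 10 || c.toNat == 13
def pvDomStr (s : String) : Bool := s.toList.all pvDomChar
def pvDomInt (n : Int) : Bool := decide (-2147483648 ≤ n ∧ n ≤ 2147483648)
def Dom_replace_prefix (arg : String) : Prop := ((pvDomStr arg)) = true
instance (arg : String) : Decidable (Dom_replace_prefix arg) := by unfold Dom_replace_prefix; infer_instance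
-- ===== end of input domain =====

-- B replaces A's six sequential whole-string replaces by one left-to-right scan; on the sole
-- overlap "gcuda" the results differ (declared in D_ below); equivalence proved elsewhere.


-- ===== PORT A =====
-- literal port of A: for each device name, if it occurs, replace all its occurrences;
-- the isinstance(arg, str) guard is always true for arg : String and is dropped.
def replace_prefix (arg : String) : String :=
  List.foldl
    (fun a s => if PySem.Str.isIn s a = true then PySem.Str.replace a s "sdccl_dev" else a)
    arg ["cuda", "mlu", "npu", "musa", "txda", "gcu"]

-- ===== PORT B =====
-- port of B's while-loop: one left-to-right scan; at each position the first device name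
-- starting there is replaced, otherwise the character is copied.
-- the loop index i advancing by 1..4 becomes structural recursion on a fuel initialised to the
-- string length (fuel never runs out: each step consumes at least one character)
def pvScan : Nat → List Char → List Char
  | 0, l => l
  | _, [] => []
  | fuel + 1, c :: t =>
    if List.isPrefixOf "cuda".toList (c :: t) then "sdccl_dev".toList ++ pvScan fuel (t.drop 3)
    else if List.isPrefixOf "mlu".toList (c :: t) then "sdccl_dev".toList ++ pvScan fuel (t.drop 2)
    else if List.isPrefixOf "npu".toList (c :: t) then "sdccl_dev".toList ++ pvScan fuel (t.drop 2)
    else if List.isPrefixOf "musa".toList (c :: t) then "sdccl_dev".toList ++ pvScan fuel (t.drop 3)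
    else if List.isPrefixOf "txda".toList (c :: t) then "sdccl_dev".toList ++ pvScan fuel (t.drop 3)
    else if List.isPrefixOf "gcu".toList (c :: t) then "sdccl_dev".toList ++ pvScan fuel (t.drop 2)
    else c :: pvScan fuel t

def replace_prefix_alt (arg : String) : String :=
  String.ofList (pvScan arg.toList.length arg.toList)

-- ===== PRECONDITION & SPEC =====
-- On strings containing "gcuda" (the only overlap between two device names) A's "cuda" pass runs
-- first and replaces the inner "cuda" ("gcuda" -> "gsdccl_dev"), while B's left-to-right scan
-- matches "gcu" first ("gcuda" -> "sdccl_devda"); leftmost-match is the standard single-pass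
-- behaviour on this unspecified overlap corner.
def D_replace_prefix (arg : String) : Prop := PySem.Str.isIn "gcuda" arg = true
instance (arg : String) : Decidable (D_replace_prefix arg) := by unfold D_replace_prefix; infer_instance

def Spec_replace_prefix (arg : String) (out : String) : Prop :=
  ¬ D_replace_prefix arg → out = replace_prefix_alt arg
instance (arg : String) (out : String) : Decidable (Spec_replace_prefix arg out) := by
  unfold Spec_replace_prefix; infer_instance

def pvDiffWitness_replace_prefix : String := "gcuda"
def pvDiffWitnessOut_replace_prefix : String × String := ("gsdccl_dev", "sdccl_devda")

-- ===== CLAIM (what is proved, stated in full; the proofs are below) =====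
def Claim_unchanged_replace_prefix : Prop :=
  ∀ (arg : String), Dom_replace_prefix arg → Spec_replace_prefix arg (replace_prefix arg)
def Claim_changed_replace_prefix : Prop :=
  Dom_replace_prefix (pvDiffWitness_replace_prefix) ∧ D_replace_prefix (pvDiffWitness_replace_prefix) ∧
  replace_prefix (pvDiffWitness_replace_prefix) = pvDiffWitnessOut_replace_prefix.1 ∧
  replace_prefix_alt (pvDiffWitness_replace_prefix) = pvDiffWitnessOut_replace_prefix.2 ∧
  pvDiffWitnessOut_replace_prefix.1 ≠ pvDiffWitnessOut_replace_prefix.2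
def Claim_exact_replace_prefix : Prop :=
  ∀ (arg : String), Dom_replace_prefix arg → D_replace_prefix arg →
    replace_prefix arg ≠ replace_prefix_alt arg

-- ===== LEMMAS AND PROOFS =====

-- the replacement text, as a char list
def pvR : List Char := "sdccl_dev".toList

-- Python's s.replace(old, "sdccl_dev") (old nonempty) as a structural recursion over the chars
def pvRepl (old : List Char) : List Char → List Char
  | [] => []
  | c :: t =>
    if old.isPrefixOf (c :: t) then pvR ++ pvRepl old (t.drop (old.length - 1))
    else c :: pvRepl old t
termination_by l => l.length
decreasing_by all_goals (simp [List.length_drop]; try omega)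

-- A's six passes, composed, on the char level
def pvA6 (s : List Char) : List Char :=
  pvRepl "gcu".toList (pvRepl "txda".toList (pvRepl "musa".toList
    (pvRepl "npu".toList (pvRepl "mlu".toList (pvRepl "cuda".toList s)))))

theorem pvRepl_go (old : List Char) (h : old ≠ []) :
    ∀ (fuel : Nat) (l acc : List Char), l.length ≤ fuel →
      PySem.Chars.replace.go old pvR fuel l acc = acc.reverse ++ pvRepl old l := by
  intro fuel
  induction fuel with
  | zero =>
    intro l acc hl
    have hnil : l = [] := List.eq_nil_of_length_eq_zero (Nat.le_zero.mp hl)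
    subst hnil
    simp [PySem.Chars.replace.go, pvRepl]
  | succ f ih =>
    intro l acc hl
    match l with
    | [] => simp [PySem.Chars.replace.go, pvRepl]
    | c :: t =>
      obtain ⟨k, hk⟩ : ∃ k, old.length = k + 1 := by
        cases old with
        | nil => exact absurd rfl h
        | cons a as => exact ⟨as.length, rfl⟩
      by_cases hp : old.isPrefixOf (c :: t) = true
      · have e1 : PySem.Chars.replace.go old pvR (f + 1) (c :: t) acc =
            PySem.Chars.replace.go old pvR f (t.drop k) (pvR.reverse ++ acc) := by
          simp [PySem.Chars.replace.go, hp, hk]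
        have e2 : pvRepl old (c :: t) = pvR ++ pvRepl old (t.drop k) := by
          simp [pvRepl, hp, hk]
        rw [e1, ih _ _ (by simp at hl ⊢; omega), e2]
        simp
      · have e1 : PySem.Chars.replace.go old pvR (f + 1) (c :: t) acc =
            PySem.Chars.replace.go old pvR f t (c :: acc) := by
          simp [PySem.Chars.replace.go, hp]
        have e2 : pvRepl old (c :: t) = c :: pvRepl old t := by
          simp [pvRepl, hp]
        rw [e1, ih _ _ (by simp at hl ⊢; omega), e2]
        simp

theorem pvReplace_eq (old : List Char) (h : old ≠ []) (s : List Char) :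
    PySem.Chars.replace s old pvR = pvRepl old s := by
  have : old.isEmpty = false := by
    cases old with
    | nil => exact absurd rfl h
    | cons a as => rfl
  simp [PySem.Chars.replace, this]
  simpa using pvRepl_go old h s.length s [] le_rfl

theorem pvRepl_of_not_infix (old : List Char) (s : List Char) (h : ¬ old <:+: s) :
    pvRepl old s = s := by
  induction s with
  | nil => simp [pvRepl]
  | cons c t ih =>
    by_cases hp : old.isPrefixOf (c :: t) = true
    · exact absurd (List.isPrefixOf_iff_prefix.mp hp).isInfix h
    · rw [show pvRepl old (c :: t) = c :: pvRepl old t from by simp [pvRepl, hp]]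
      rw [ih fun hi => h (hi.trans (List.suffix_cons c t).isInfix)]

theorem pvStep (d : String) (hd : d.toList ≠ []) (a : String) :
    (if PySem.Str.isIn d a = true then PySem.Str.replace a d "sdccl_dev" else a) =
      String.ofList (pvRepl d.toList a.toList) := by
  by_cases hin : PySem.Str.isIn d a = true
  · rw [if_pos hin]
    show String.ofList (PySem.Chars.replace a.toList d.toList "sdccl_dev".toList) = _
    rw [show "sdccl_dev".toList = pvR from rfl, pvReplace_eq d.toList hd a.toList]
  · have hninf : ¬ (d.toList <:+: a.toList) := fun hg =>
      hin ((PySem.Str.isIn_iff_infix _ _).mpr hg)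
    rw [if_neg hin, pvRepl_of_not_infix d.toList a.toList hninf, String.ofList_toList]

theorem pv_cuda : "cuda".toList = ['c','u','d','a'] := rfl
theorem pv_mlu : "mlu".toList = ['m','l','u'] := rfl
theorem pv_npu : "npu".toList = ['n','p','u'] := rfl
theorem pv_musa : "musa".toList = ['m','u','s','a'] := rfl
theorem pv_txda : "txda".toList = ['t','x','d','a'] := rfl
theorem pv_gcu : "gcu".toList = ['g','c','u'] := rfl
theorem pv_sdccl : "sdccl_dev".toList = ['s','d','c','c','l','_','d','e','v'] := rfl

theorem pv_gcuda : "gcuda".toList = ['g','c','u','d','a'] := rfl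

def pvW : List (List Char) :=
  [['l','u'], ['p','u'], ['u','s','a'], ['x','d','a'], ['c','u'], ['u'], ['s','a'], ['d','a'], ['a'], []]

theorem pvT (p : List Char) : ∀ (t : List Char), ∀ w ∈ pvW,
    w.isPrefixOf (pvRepl p t) = true → w.isPrefixOf t = true := by
  intro t
  induction t with
  | nil => intro w hw h; simpa [pvRepl] using h
  | cons c t ih =>
    intro w hw h
    by_cases hp : p.isPrefixOf (c :: t) = true
    · rw [show pvRepl p (c :: t) = pvR ++ pvRepl p (t.drop (p.length - 1)) from by
        simp [pvRepl, hp]] at h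
      fin_cases hw <;> simp_all [pvR, List.isPrefixOf]
    · rw [show pvRepl p (c :: t) = c :: pvRepl p t from by simp [pvRepl, hp]] at h
      fin_cases hw <;> simp only [List.isPrefixOf, Bool.and_eq_true, beq_iff_eq] at h ⊢ <;>
        first
        | exact ⟨h.1, ih _ (by decide) h.2⟩
        | exact h

theorem pvPrefFalse (qh : Char) (qt : List Char) (hqt : qt ∈ pvW) (c : Char) (t X : List Char)
    (h : List.isPrefixOf (qh :: qt) (c :: t) = false)
    (hX : ∀ w ∈ pvW, w.isPrefixOf X = true → w.isPrefixOf t = true) :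
    List.isPrefixOf (qh :: qt) (c :: X) = false := by
  by_contra hb
  rw [Bool.not_eq_false] at hb
  have hb' : (qh == c) = true ∧ qt.isPrefixOf X = true := by
    simpa [List.isPrefixOf, Bool.and_eq_true] using hb
  have ht : List.isPrefixOf (qh :: qt) (c :: t) = true := by
    simp only [List.isPrefixOf, Bool.and_eq_true]
    exact ⟨hb'.1, hX qt hqt hb'.2⟩
  simp [ht] at h

theorem pvA6_cuda (t : List Char) : pvA6 ('c'::'u'::'d'::'a'::t) = pvR ++ pvA6 t := by
  simp [pvA6, pvRepl, pvR, List.isPrefixOf, pv_cuda, pv_mlu, pv_npu, pv_musa, pv_txda, pv_gcu, pv_sdccl]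
theorem pvA6_mlu (t : List Char) : pvA6 ('m'::'l'::'u'::t) = pvR ++ pvA6 t := by
  simp [pvA6, pvRepl, pvR, List.isPrefixOf, pv_cuda, pv_mlu, pv_npu, pv_musa, pv_txda, pv_gcu, pv_sdccl]
theorem pvA6_npu (t : List Char) : pvA6 ('n'::'p'::'u'::t) = pvR ++ pvA6 t := by
  simp [pvA6, pvRepl, pvR, List.isPrefixOf, pv_cuda, pv_mlu, pv_npu, pv_musa, pv_txda, pv_gcu, pv_sdccl]
theorem pvA6_musa (t : List Char) : pvA6 ('m'::'u'::'s'::'a'::t) = pvR ++ pvA6 t := by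
  simp [pvA6, pvRepl, pvR, List.isPrefixOf, pv_cuda, pv_mlu, pv_npu, pv_musa, pv_txda, pv_gcu, pv_sdccl]
theorem pvA6_txda (t : List Char) : pvA6 ('t'::'x'::'d'::'a'::t) = pvR ++ pvA6 t := by
  simp [pvA6, pvRepl, pvR, List.isPrefixOf, pv_cuda, pv_mlu, pv_npu, pv_musa, pv_txda, pv_gcu, pv_sdccl]
theorem pvA6_gcu (t : List Char) (hda : List.isPrefixOf ['d','a'] t = false) :
    pvA6 ('g'::'c'::'u'::t) = pvR ++ pvA6 t := by
  simp [pvA6, pvRepl, pvR, List.isPrefixOf, hda, pv_cuda, pv_mlu, pv_npu, pv_musa, pv_txda, pv_gcu, pv_sdccl]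

theorem pvA6_cons (c : Char) (t : List Char)
    (h1 : List.isPrefixOf "cuda".toList (c :: t) = false)
    (h2 : List.isPrefixOf "mlu".toList (c :: t) = false)
    (h3 : List.isPrefixOf "npu".toList (c :: t) = false)
    (h4 : List.isPrefixOf "musa".toList (c :: t) = false)
    (h5 : List.isPrefixOf "txda".toList (c :: t) = false)
    (h6 : List.isPrefixOf "gcu".toList (c :: t) = false) :
    pvA6 (c :: t) = c :: pvA6 t := by
  have T1 : ∀ w ∈ pvW, w.isPrefixOf (pvRepl "cuda".toList t) = true → w.isPrefixOf t = true :=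
    fun w hw h => pvT _ _ w hw h
  have T2 : ∀ w ∈ pvW,
      w.isPrefixOf (pvRepl "mlu".toList (pvRepl "cuda".toList t)) = true →
        w.isPrefixOf t = true :=
    fun w hw h => T1 w hw (pvT _ _ w hw h)
  have T3 : ∀ w ∈ pvW,
      w.isPrefixOf (pvRepl "npu".toList (pvRepl "mlu".toList (pvRepl "cuda".toList t))) = true →
        w.isPrefixOf t = true :=
    fun w hw h => T2 w hw (pvT _ _ w hw h)
  have T4 : ∀ w ∈ pvW,
      w.isPrefixOf (pvRepl "musa".toList (pvRepl "npu".toList (pvRepl "mlu".toList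
        (pvRepl "cuda".toList t)))) = true → w.isPrefixOf t = true :=
    fun w hw h => T3 w hw (pvT _ _ w hw h)
  have T5 : ∀ w ∈ pvW,
      w.isPrefixOf (pvRepl "txda".toList (pvRepl "musa".toList (pvRepl "npu".toList
        (pvRepl "mlu".toList (pvRepl "cuda".toList t))))) = true → w.isPrefixOf t = true :=
    fun w hw h => T4 w hw (pvT _ _ w hw h)
  have n2 := pvPrefFalse 'm' ['l','u'] (by decide) c t _ (by simpa [pv_mlu] using h2) T1
  have n3 := pvPrefFalse 'n' ['p','u'] (by decide) c t _ (by simpa [pv_npu] using h3) T2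
  have n4 := pvPrefFalse 'm' ['u','s','a'] (by decide) c t _ (by simpa [pv_musa] using h4) T3
  have n5 := pvPrefFalse 't' ['x','d','a'] (by decide) c t _ (by simpa [pv_txda] using h5) T4
  have n6 := pvPrefFalse 'g' ['c','u'] (by decide) c t _ (by simpa [pv_gcu] using h6) T5
  have e1 : pvRepl "cuda".toList (c :: t) = c :: pvRepl "cuda".toList t := by
    simp only [pvRepl]; rw [if_neg (fun hq => by rw [hq] at h1; cases h1)]
  have e2 : pvRepl "mlu".toList (c :: pvRepl "cuda".toList t) =
      c :: pvRepl "mlu".toList (pvRepl "cuda".toList t) := by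
    simp only [pvRepl]; rw [if_neg (fun hq => by rw [pv_mlu] at hq; rw [hq] at n2; cases n2)]
  have e3 : pvRepl "npu".toList (c :: pvRepl "mlu".toList (pvRepl "cuda".toList t)) =
      c :: pvRepl "npu".toList (pvRepl "mlu".toList (pvRepl "cuda".toList t)) := by
    simp only [pvRepl]; rw [if_neg (fun hq => by rw [pv_npu] at hq; rw [hq] at n3; cases n3)]
  have e4 : pvRepl "musa".toList (c :: pvRepl "npu".toList (pvRepl "mlu".toList
      (pvRepl "cuda".toList t))) =
      c :: pvRepl "musa".toList (pvRepl "npu".toList (pvRepl "mlu".toList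
        (pvRepl "cuda".toList t))) := by
    simp only [pvRepl]; rw [if_neg (fun hq => by rw [pv_musa] at hq; rw [hq] at n4; cases n4)]
  have e5 : pvRepl "txda".toList (c :: pvRepl "musa".toList (pvRepl "npu".toList
      (pvRepl "mlu".toList (pvRepl "cuda".toList t)))) =
      c :: pvRepl "txda".toList (pvRepl "musa".toList (pvRepl "npu".toList
        (pvRepl "mlu".toList (pvRepl "cuda".toList t)))) := by
    simp only [pvRepl]; rw [if_neg (fun hq => by rw [pv_txda] at hq; rw [hq] at n5; cases n5)]
  have e6 : pvRepl "gcu".toList (c :: pvRepl "txda".toList (pvRepl "musa".toList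
      (pvRepl "npu".toList (pvRepl "mlu".toList (pvRepl "cuda".toList t))))) =
      c :: pvRepl "gcu".toList (pvRepl "txda".toList (pvRepl "musa".toList
        (pvRepl "npu".toList (pvRepl "mlu".toList (pvRepl "cuda".toList t))))) := by
    simp only [pvRepl]; rw [if_neg (fun hq => by rw [pv_gcu] at hq; rw [hq] at n6; cases n6)]
  simp only [pvA6]
  rw [e1, e2, e3, e4, e5, e6]

theorem pvMain : ∀ (n : Nat) (s : List Char), s.length ≤ n → ¬ ("gcuda".toList <:+: s) →
    pvA6 s = pvScan n s := by
  intro n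
  induction n with
  | zero =>
    intro s hl _
    have hnil : s = [] := List.eq_nil_of_length_eq_zero (Nat.le_zero.mp hl)
    subst hnil
    simp [pvA6, pvRepl, pvScan]
  | succ n ih =>
    intro s hl hnoG
    cases s with
    | nil => simp [pvA6, pvRepl, pvScan]
    | cons c t =>
      simp only [List.length_cons] at hl
      by_cases hd1 : List.isPrefixOf "cuda".toList (c :: t) = true
      · obtain ⟨r, hr⟩ := List.isPrefixOf_iff_prefix.mp hd1
        have hlr : r.length ≤ n := by
          have hh := congrArg List.length hr; simp [pv_cuda] at hh; omega
        have hnr : ¬ ("gcuda".toList <:+: r) := fun hi =>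
          hnoG (by rw [← hr]; exact hi.trans (List.suffix_append _ _).isInfix)
        rw [← hr, show ("cuda".toList ++ r) = 'c'::'u'::'d'::'a'::r from by simp [pv_cuda]]
        rw [pvA6_cuda r,
          show pvScan (n+1) ('c'::'u'::'d'::'a'::r) = "sdccl_dev".toList ++ pvScan n r from by
            simp [pvScan, List.isPrefixOf, pv_cuda], ih r hlr hnr]
        rfl
      · by_cases hd2 : List.isPrefixOf "mlu".toList (c :: t) = true
        · obtain ⟨r, hr⟩ := List.isPrefixOf_iff_prefix.mp hd2
          have hlr : r.length ≤ n := by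
            have hh := congrArg List.length hr; simp [pv_mlu] at hh; omega
          have hnr : ¬ ("gcuda".toList <:+: r) := fun hi =>
            hnoG (by rw [← hr]; exact hi.trans (List.suffix_append _ _).isInfix)
          rw [← hr, show ("mlu".toList ++ r) = 'm'::'l'::'u'::r from by simp [pv_mlu]]
          rw [pvA6_mlu r,
            show pvScan (n+1) ('m'::'l'::'u'::r) = "sdccl_dev".toList ++ pvScan n r from by
              simp [pvScan, List.isPrefixOf, pv_cuda, pv_mlu], ih r hlr hnr]
          rfl
        · by_cases hd3 : List.isPrefixOf "npu".toList (c :: t) = true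
          · obtain ⟨r, hr⟩ := List.isPrefixOf_iff_prefix.mp hd3
            have hlr : r.length ≤ n := by
              have hh := congrArg List.length hr; simp [pv_npu] at hh; omega
            have hnr : ¬ ("gcuda".toList <:+: r) := fun hi =>
              hnoG (by rw [← hr]; exact hi.trans (List.suffix_append _ _).isInfix)
            rw [← hr, show ("npu".toList ++ r) = 'n'::'p'::'u'::r from by simp [pv_npu]]
            rw [pvA6_npu r,
              show pvScan (n+1) ('n'::'p'::'u'::r) = "sdccl_dev".toList ++ pvScan n r from by
                simp [pvScan, List.isPrefixOf, pv_cuda, pv_mlu, pv_npu], ih r hlr hnr]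
            rfl
          · by_cases hd4 : List.isPrefixOf "musa".toList (c :: t) = true
            · obtain ⟨r, hr⟩ := List.isPrefixOf_iff_prefix.mp hd4
              have hlr : r.length ≤ n := by
                have hh := congrArg List.length hr; simp [pv_musa] at hh; omega
              have hnr : ¬ ("gcuda".toList <:+: r) := fun hi =>
                hnoG (by rw [← hr]; exact hi.trans (List.suffix_append _ _).isInfix)
              rw [← hr, show ("musa".toList ++ r) = 'm'::'u'::'s'::'a'::r from by simp [pv_musa]]
              rw [pvA6_musa r,
                show pvScan (n+1) ('m'::'u'::'s'::'a'::r) = "sdccl_dev".toList ++ pvScan n r from by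
                  simp [pvScan, List.isPrefixOf, pv_cuda, pv_mlu, pv_npu, pv_musa], ih r hlr hnr]
              rfl
            · by_cases hd5 : List.isPrefixOf "txda".toList (c :: t) = true
              · obtain ⟨r, hr⟩ := List.isPrefixOf_iff_prefix.mp hd5
                have hlr : r.length ≤ n := by
                  have hh := congrArg List.length hr; simp [pv_txda] at hh; omega
                have hnr : ¬ ("gcuda".toList <:+: r) := fun hi =>
                  hnoG (by rw [← hr]; exact hi.trans (List.suffix_append _ _).isInfix)
                rw [← hr, show ("txda".toList ++ r) = 't'::'x'::'d'::'a'::r from by simp [pv_txda]]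
                rw [pvA6_txda r,
                  show pvScan (n+1) ('t'::'x'::'d'::'a'::r) = "sdccl_dev".toList ++ pvScan n r from by
                    simp [pvScan, List.isPrefixOf, pv_cuda, pv_mlu, pv_npu, pv_musa, pv_txda],
                  ih r hlr hnr]
                rfl
              · by_cases hd6 : List.isPrefixOf "gcu".toList (c :: t) = true
                · obtain ⟨r, hr⟩ := List.isPrefixOf_iff_prefix.mp hd6
                  have hlr : r.length ≤ n := by
                    have hh := congrArg List.length hr; simp [pv_gcu] at hh; omega
                  have hnr : ¬ ("gcuda".toList <:+: r) := fun hi =>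
                    hnoG (by rw [← hr]; exact hi.trans (List.suffix_append _ _).isInfix)
                  by_cases hda : List.isPrefixOf ['d','a'] r = true
                  · obtain ⟨r2, hr2⟩ := List.isPrefixOf_iff_prefix.mp hda
                    refine absurd (List.IsPrefix.isInfix ⟨r2, ?_⟩) hnoG
                    rw [← hr, ← hr2]; simp [pv_gcu, pv_gcuda]
                  · rw [Bool.not_eq_true] at hda
                    rw [← hr, show ("gcu".toList ++ r) = 'g'::'c'::'u'::r from by simp [pv_gcu]]
                    rw [pvA6_gcu r hda,
                      show pvScan (n+1) ('g'::'c'::'u'::r) = "sdccl_dev".toList ++ pvScan n r from by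
                        simp only [pvScan]
                        rw [if_neg (fun hq => by rw [pv_cuda] at hq; simp [List.isPrefixOf] at hq)]
                        · rw [if_neg (by rw [pv_mlu]; simp [List.isPrefixOf])]
                          rw [if_neg (by rw [pv_npu]; simp [List.isPrefixOf])]
                          rw [if_neg (by rw [pv_musa]; simp [List.isPrefixOf])]
                          rw [if_neg (by rw [pv_txda]; simp [List.isPrefixOf])]
                          rw [if_pos (by rw [pv_gcu]; simp [List.isPrefixOf])]
                          simp, ih r hlr hnr]
                    rfl
                · rw [Bool.not_eq_true] at hd1 hd2 hd3 hd4 hd5 hd6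
                  have hnt : ¬ ("gcuda".toList <:+: t) := fun hi =>
                    hnoG (hi.trans (List.suffix_cons c t).isInfix)
                  rw [pvA6_cons c t hd1 hd2 hd3 hd4 hd5 hd6]
                  rw [show pvScan (n+1) (c :: t) = c :: pvScan n t from by
                    simp only [pvScan]
                    rw [if_neg (fun hq => by rw [hq] at hd1; cases hd1),
                      if_neg (fun hq => by rw [hq] at hd2; cases hd2),
                      if_neg (fun hq => by rw [hq] at hd3; cases hd3),
                      if_neg (fun hq => by rw [hq] at hd4; cases hd4),
                      if_neg (fun hq => by rw [hq] at hd5; cases hd5),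
                      if_neg (fun hq => by rw [hq] at hd6; cases hd6)]]
                  rw [ih t (by omega) hnt]


theorem pvA_chars (arg : String) : replace_prefix arg = String.ofList (pvA6 arg.toList) := by
  unfold replace_prefix pvA6
  simp only [List.foldl_cons, List.foldl_nil]
  rw [pvStep "cuda" (by decide) arg, pvStep "mlu" (by decide), pvStep "npu" (by decide),
    pvStep "musa" (by decide), pvStep "txda" (by decide), pvStep "gcu" (by decide)]
  simp [String.toList_ofList]

theorem pvA6_gcuda (v : List Char) :
    pvA6 ('g'::'c'::'u'::'d'::'a'::v) = 'g' :: pvR ++ pvA6 v := by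
  simp [pvA6, pvRepl, pvR, List.isPrefixOf, pv_cuda, pv_mlu, pv_npu, pv_musa, pv_txda, pv_gcu, pv_sdccl]

theorem pvMainNe : ∀ (n : Nat) (s : List Char), s.length ≤ n → ("gcuda".toList <:+: s) →
    pvA6 s ≠ pvScan n s := by
  intro n
  induction n with
  | zero =>
    intro s hl hi
    have hnil : s = [] := List.eq_nil_of_length_eq_zero (Nat.le_zero.mp hl)
    subst hnil
    simp [pv_gcuda] at hi
  | succ n ih =>
    intro s hl hi
    cases s with
    | nil => simp [pv_gcuda] at hi
    | cons c t =>
      simp only [List.length_cons] at hl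
      by_cases hd1 : List.isPrefixOf "cuda".toList (c :: t) = true
      · obtain ⟨r, hr⟩ := List.isPrefixOf_iff_prefix.mp hd1
        have hlr : r.length ≤ n := by
          have hh := congrArg List.length hr; simp [pv_cuda] at hh; omega
        have hir : "gcuda".toList <:+: r := by
          rw [← hr] at hi
          simpa [pv_cuda, pv_gcuda, List.infix_cons_iff, List.cons_prefix_iff] using hi
        rw [← hr, show ("cuda".toList ++ r) = 'c'::'u'::'d'::'a'::r from by simp [pv_cuda]]
        rw [pvA6_cuda r,
          show pvScan (n+1) ('c'::'u'::'d'::'a'::r) = "sdccl_dev".toList ++ pvScan n r from by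
            simp [pvScan, List.isPrefixOf, pv_cuda]]
        intro heq
        exact ih r hlr hir (List.append_cancel_left heq)
      · by_cases hd2 : List.isPrefixOf "mlu".toList (c :: t) = true
        · obtain ⟨r, hr⟩ := List.isPrefixOf_iff_prefix.mp hd2
          have hlr : r.length ≤ n := by
            have hh := congrArg List.length hr; simp [pv_mlu] at hh; omega
          have hir : "gcuda".toList <:+: r := by
            rw [← hr] at hi
            simpa [pv_mlu, pv_gcuda, List.infix_cons_iff, List.cons_prefix_iff] using hi
          rw [← hr, show ("mlu".toList ++ r) = 'm'::'l'::'u'::r from by simp [pv_mlu]]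
          rw [pvA6_mlu r,
            show pvScan (n+1) ('m'::'l'::'u'::r) = "sdccl_dev".toList ++ pvScan n r from by
              simp [pvScan, List.isPrefixOf, pv_cuda, pv_mlu]]
          intro heq
          exact ih r hlr hir (List.append_cancel_left heq)
        · by_cases hd3 : List.isPrefixOf "npu".toList (c :: t) = true
          · obtain ⟨r, hr⟩ := List.isPrefixOf_iff_prefix.mp hd3
            have hlr : r.length ≤ n := by
              have hh := congrArg List.length hr; simp [pv_npu] at hh; omega
            have hir : "gcuda".toList <:+: r := by
              rw [← hr] at hi
              simpa [pv_npu, pv_gcuda, List.infix_cons_iff, List.cons_prefix_iff] using hi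
            rw [← hr, show ("npu".toList ++ r) = 'n'::'p'::'u'::r from by simp [pv_npu]]
            rw [pvA6_npu r,
              show pvScan (n+1) ('n'::'p'::'u'::r) = "sdccl_dev".toList ++ pvScan n r from by
                simp [pvScan, List.isPrefixOf, pv_cuda, pv_mlu, pv_npu]]
            intro heq
            exact ih r hlr hir (List.append_cancel_left heq)
          · by_cases hd4 : List.isPrefixOf "musa".toList (c :: t) = true
            · obtain ⟨r, hr⟩ := List.isPrefixOf_iff_prefix.mp hd4
              have hlr : r.length ≤ n := by
                have hh := congrArg List.length hr; simp [pv_musa] at hh; omega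
              have hir : "gcuda".toList <:+: r := by
                rw [← hr] at hi
                simpa [pv_musa, pv_gcuda, List.infix_cons_iff, List.cons_prefix_iff] using hi
              rw [← hr, show ("musa".toList ++ r) = 'm'::'u'::'s'::'a'::r from by simp [pv_musa]]
              rw [pvA6_musa r,
                show pvScan (n+1) ('m'::'u'::'s'::'a'::r) = "sdccl_dev".toList ++ pvScan n r from by
                  simp [pvScan, List.isPrefixOf, pv_cuda, pv_mlu, pv_npu, pv_musa]]
              intro heq
              exact ih r hlr hir (List.append_cancel_left heq)
            · by_cases hd5 : List.isPrefixOf "txda".toList (c :: t) = true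
              · obtain ⟨r, hr⟩ := List.isPrefixOf_iff_prefix.mp hd5
                have hlr : r.length ≤ n := by
                  have hh := congrArg List.length hr; simp [pv_txda] at hh; omega
                have hir : "gcuda".toList <:+: r := by
                  rw [← hr] at hi
                  simpa [pv_txda, pv_gcuda, List.infix_cons_iff, List.cons_prefix_iff] using hi
                rw [← hr, show ("txda".toList ++ r) = 't'::'x'::'d'::'a'::r from by simp [pv_txda]]
                rw [pvA6_txda r,
                  show pvScan (n+1) ('t'::'x'::'d'::'a'::r) = "sdccl_dev".toList ++ pvScan n r from by
                    simp [pvScan, List.isPrefixOf, pv_cuda, pv_mlu, pv_npu, pv_musa, pv_txda]]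
                intro heq
                exact ih r hlr hir (List.append_cancel_left heq)
              · by_cases hd6 : List.isPrefixOf "gcu".toList (c :: t) = true
                · obtain ⟨r, hr⟩ := List.isPrefixOf_iff_prefix.mp hd6
                  have hlr : r.length ≤ n := by
                    have hh := congrArg List.length hr; simp [pv_gcu] at hh; omega
                  by_cases hda : List.isPrefixOf ['d','a'] r = true
                  · obtain ⟨v, hv⟩ := List.isPrefixOf_iff_prefix.mp hda
                    rw [← hr, ← hv, show ("gcu".toList ++ (['d','a'] ++ v)) =
                      'g'::'c'::'u'::'d'::'a'::v from by simp [pv_gcu]]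
                    rw [pvA6_gcuda v,
                      show pvScan (n+1) ('g'::'c'::'u'::'d'::'a'::v) =
                          "sdccl_dev".toList ++ pvScan n ('d'::'a'::v) from by
                        simp [pvScan, List.isPrefixOf, pv_cuda, pv_mlu, pv_npu, pv_musa,
                          pv_txda, pv_gcu]]
                    simp [pvR, pv_sdccl]
                  · rw [Bool.not_eq_true] at hda
                    have hir : "gcuda".toList <:+: r := by
                      rw [← hr] at hi
                      rcases (by simpa [pv_gcu, pv_gcuda, List.infix_cons_iff,
                          List.cons_prefix_iff] using hi :
                          (∃ l', r = 'd' :: 'a' :: l') ∨ (['g','c','u','d','a'] <:+: r)) with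
                        ⟨l', rfl⟩ | h
                      · simp [List.isPrefixOf] at hda
                      · exact h
                    rw [← hr, show ("gcu".toList ++ r) = 'g'::'c'::'u'::r from by simp [pv_gcu]]
                    rw [pvA6_gcu r hda,
                      show pvScan (n+1) ('g'::'c'::'u'::r) = "sdccl_dev".toList ++ pvScan n r from by
                        simp only [pvScan]
                        rw [if_neg (fun hq => by rw [pv_cuda] at hq; simp [List.isPrefixOf] at hq)]
                        rw [if_neg (by rw [pv_mlu]; simp [List.isPrefixOf])]
                        rw [if_neg (by rw [pv_npu]; simp [List.isPrefixOf])]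
                        rw [if_neg (by rw [pv_musa]; simp [List.isPrefixOf])]
                        rw [if_neg (by rw [pv_txda]; simp [List.isPrefixOf])]
                        rw [if_pos (by rw [pv_gcu]; simp [List.isPrefixOf])]
                        simp]
                    intro heq
                    exact ih r hlr hir (List.append_cancel_left heq)
                · rw [Bool.not_eq_true] at hd1 hd2 hd3 hd4 hd5 hd6
                  have hit : "gcuda".toList <:+: t := by
                    rcases List.infix_cons_iff.mp hi with hp | hit
                    · exfalso
                      have : List.isPrefixOf "gcu".toList (c :: t) = true :=
                        List.isPrefixOf_iff_prefix.mpr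
                          ((by decide : "gcu".toList <+: "gcuda".toList).trans hp)
                      rw [this] at hd6; cases hd6
                    · exact hit
                  rw [pvA6_cons c t hd1 hd2 hd3 hd4 hd5 hd6]
                  rw [show pvScan (n+1) (c :: t) = c :: pvScan n t from by
                    simp only [pvScan]
                    rw [if_neg (fun hq => by rw [hq] at hd1; cases hd1),
                      if_neg (fun hq => by rw [hq] at hd2; cases hd2),
                      if_neg (fun hq => by rw [hq] at hd3; cases hd3),
                      if_neg (fun hq => by rw [hq] at hd4; cases hd4),
                      if_neg (fun hq => by rw [hq] at hd5; cases hd5),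
                      if_neg (fun hq => by rw [hq] at hd6; cases hd6)]]
                  intro heq
                  exact ih t (by omega) hit (List.cons.inj heq).2

-- ===== VERDICT (by name: the statement is the Claim_ definition above) =====
theorem replace_prefix_spec : Claim_unchanged_replace_prefix := by
  intro arg _
  unfold Spec_replace_prefix
  intro hD
  have hninf : ¬ ("gcuda".toList <:+: arg.toList) := fun hg =>
    hD ((PySem.Str.isIn_iff_infix _ _).mpr hg)
  rw [pvA_chars]
  show String.ofList (pvA6 arg.toList) = replace_prefix_alt arg
  unfold replace_prefix_alt
  exact congrArg String.ofList (pvMain arg.toList.length arg.toList le_rfl hninf)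

theorem replace_prefix_changed : Claim_changed_replace_prefix := by
  unfold Claim_changed_replace_prefix; decide

theorem replace_prefix_tight : Claim_exact_replace_prefix := by
  intro arg _ hD heq
  have hinf : "gcuda".toList <:+: arg.toList := (PySem.Str.isIn_iff_infix _ _).mp hD
  have hchars : pvA6 arg.toList = pvScan arg.toList.length arg.toList := by
    have h1 := congrArg String.toList (pvA_chars arg ▸ heq)
    simpa [replace_prefix_alt, String.toList_ofList] using h1
  exact pvMainNe arg.toList.length arg.toList le_rfl hinf hchars
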